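-- pv_equiv track=rewrite | github.com/google-research/google-research | vrdu/benchmark_utils.py | remove_redundant_unrepeated_entities
-- ===== SOURCE A (Python) =====
-- def remove_redundant_unrepeated_entities(
--     doc_extractions,
--     unrepeated_entity_names):
--   """Only keeps the first extracted entity for each unrepeated entity name.
--
--   The entity names include repeated and unrepeated ones. For unrepeated entity
--   names, the model should only keep one extraction item as the most confident
--   one. When the model does not have such a strategy in the algorithm and
--   extracts multiple entities for an unrepeated entity name, we only keep the
--   first one as the extraction result. In the future, the models can propose
--   customized algorithm to choose the most confident entity.
--
--   Args:
--     doc_extractions: A list of entity items from extraction results.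
--     unrepeated_entity_names: A list of unrepeated entity names and the result
--       only has one entity for each entity name in this list.
--
--   Returns:
--     There is only one entity available for each unrepeated entity names in the
--     output list. The repeated entities remain the same.
--   """
--
--   selected_extractions = []
--   selected_entity_names = set()
--
--   for ex_entity_item in doc_extractions:
--     entity_name = ex_entity_item[0]
--     if entity_name not in unrepeated_entity_names:
--       selected_extractions.append(ex_entity_item)
--     else:
--       if entity_name not in selected_entity_names:
--         selected_entity_names.add(entity_name)
--         selected_extractions.append(ex_entity_item)
--   return selected_extractions
-- ===== SOURCE B (Python) =====
-- def remove_redundant_unrepeated_entities(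
--     doc_extractions,
--     unrepeated_entity_names):
--   """Two-pass version: build a first-occurrence index, then filter by it."""
--   first_index = {}
--   for i, item in enumerate(doc_extractions):
--     name = item[0]
--     if name in unrepeated_entity_names and name not in first_index:
--       first_index[name] = i
--   return [item for i, item in enumerate(doc_extractions)
--           if item[0] not in unrepeated_entity_names or first_index[item[0]] == i]
-- ===== Notes on version B (the rewrite author's own statement) =====
-- stated objective: alternative
-- what changed: Replaces the incremental seen-set accumulation with a two-pass scheme: one pass builds a first-occurrence index table, then an order-preserving comprehension keeps an item iff its name is repeated or its index equals the tabled first occurrence.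
import Mathlib
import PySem

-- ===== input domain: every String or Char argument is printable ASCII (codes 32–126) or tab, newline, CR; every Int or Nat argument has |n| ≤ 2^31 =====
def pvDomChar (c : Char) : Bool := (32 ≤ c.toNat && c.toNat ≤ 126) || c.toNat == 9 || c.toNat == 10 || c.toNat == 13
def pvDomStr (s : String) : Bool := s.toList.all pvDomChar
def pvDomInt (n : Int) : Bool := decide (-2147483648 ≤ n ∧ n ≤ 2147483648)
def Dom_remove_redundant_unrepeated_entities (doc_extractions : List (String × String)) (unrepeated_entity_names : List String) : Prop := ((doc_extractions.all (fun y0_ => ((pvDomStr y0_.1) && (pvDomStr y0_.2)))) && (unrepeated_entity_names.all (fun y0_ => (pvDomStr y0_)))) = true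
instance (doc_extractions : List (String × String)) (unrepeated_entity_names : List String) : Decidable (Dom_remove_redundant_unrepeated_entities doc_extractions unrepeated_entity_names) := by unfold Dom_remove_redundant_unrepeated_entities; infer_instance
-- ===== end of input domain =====

-- B replaces A's incremental seen-set with a first-occurrence index table plus an
-- index-matching filter (alternative decomposition, same result).

-- ===== PORT A =====
-- Literal port of A: one fold carrying (selected_extractions, selected_entity_names).
def remove_redundant_unrepeated_entities (doc_extractions : List (String × String)) (unrepeated_entity_names : List String) : List (String × String) :=
  (doc_extractions.foldl
    (fun (st : List (String × String) × PySem.Set String) ex_entity_item =>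
      let entity_name := ex_entity_item.1
      if ¬ (unrepeated_entity_names.contains entity_name) then
        (st.1 ++ [ex_entity_item], st.2)
      else
        if ¬ (PySem.Set.contains st.2 entity_name) then
          (st.1 ++ [ex_entity_item], PySem.Set.add st.2 entity_name)
        else st)
    ([], PySem.Set.empty)).1

-- ===== PORT B =====
-- Port of B: first pass builds first_index over enumerate, second pass filters by it.
def remove_redundant_unrepeated_entities_alt (doc_extractions : List (String × String)) (unrepeated_entity_names : List String) : List (String × String) :=
  let first_index : PySem.Dict String Int :=
    (PySem.List.enumerate doc_extractions).foldl
      (fun d p =>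
        if unrepeated_entity_names.contains p.2.1 ∧ ¬ d.contains p.2.1 then
          d.insert p.2.1 p.1
        else d)
      PySem.Dict.empty
  (PySem.List.enumerate doc_extractions).filterMap
    (fun p =>
      if ¬ (unrepeated_entity_names.contains p.2.1) ∨ first_index.get? p.2.1 = some p.1 then
        some p.2
      else none)

-- ===== PRECONDITION & SPEC =====
def Spec_remove_redundant_unrepeated_entities (doc_extractions : List (String × String)) (unrepeated_entity_names : List String) (out : List (String × String)) : Prop := out = remove_redundant_unrepeated_entities_alt doc_extractions unrepeated_entity_names
instance (doc_extractions : List (String × String)) (unrepeated_entity_names : List String) (out : List (String × String)) : Decidable (Spec_remove_redundant_unrepeated_entities doc_extractions unrepeated_entity_names out) := by unfold Spec_remove_redundant_unrepeated_entities; infer_instance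

-- ===== CLAIM (what is proved, stated in full; the proofs are below) =====
def Claim_equal_remove_redundant_unrepeated_entities : Prop := ∀ (doc_extractions : List (String × String)) (unrepeated_entity_names : List String), Dom_remove_redundant_unrepeated_entities doc_extractions unrepeated_entity_names → Spec_remove_redundant_unrepeated_entities doc_extractions unrepeated_entity_names (remove_redundant_unrepeated_entities doc_extractions unrepeated_entity_names)

-- ===== LEMMAS AND PROOFS =====

-- Reference recursion: A's loop body with the accumulator factored out.
def pvGoA (unrep : List String) : List (String × String) → PySem.Set String → List (String × String)
  | [], _ => []
  | x :: rest, seen =>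
    if ¬ (unrep.contains x.1) then x :: pvGoA unrep rest seen
    else if ¬ (PySem.Set.contains seen x.1) then x :: pvGoA unrep rest (PySem.Set.add seen x.1)
    else pvGoA unrep rest seen

theorem pvFoldA (unrep : List String) (xs : List (String × String))
    (acc : List (String × String)) (seen : PySem.Set String) :
    (xs.foldl
      (fun (st : List (String × String) × PySem.Set String) x =>
        if ¬ (unrep.contains x.1) then (st.1 ++ [x], st.2)
        else if ¬ (PySem.Set.contains st.2 x.1) then (st.1 ++ [x], PySem.Set.add st.2 x.1)
        else st)
      (acc, seen)).1 = acc ++ pvGoA unrep xs seen := by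
  induction xs generalizing acc seen with
  | nil => simp [pvGoA]
  | cons x rest ih =>
    simp only [List.foldl_cons, pvGoA]
    split_ifs with h1 h2 <;> rw [ih] <;> simp

-- The table-building fold: abbreviation used only in the proofs.
def pvBuild (unrep : List String) (l : List (Int × (String × String)))
    (d : PySem.Dict String Int) : PySem.Dict String Int :=
  l.foldl
    (fun d p =>
      if unrep.contains p.2.1 ∧ ¬ d.contains p.2.1 then d.insert p.2.1 p.1 else d) d

-- Insert-if-absent never destroys an existing entry.
theorem pvBuild_preserve (unrep : List String) (l : List (Int × (String × String)))
    (d : PySem.Dict String Int) (n : String) (v : Int) (h : d.get? n = some v) :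
    (pvBuild unrep l d).get? n = some v := by
  induction l generalizing d with
  | nil => exact h
  | cons p rest ih =>
    simp only [pvBuild, List.foldl_cons] at *
    split_ifs with hc
    · apply ih
      rcases hc with ⟨-, hnc⟩
      have hne : n ≠ p.2.1 := by
        intro he; subst he
        rw [PySem.Dict.contains_eq_isSome_get?, h] at hnc; simp at hnc
      rw [PySem.Dict.get?_insert_of_ne _ _ hne, h]
    · exact ih _ h

-- Every entry of the built table is an old entry or has value ≥ the start index.
theorem pvBuild_bound (unrep : List String) (xs : List (String × String)) (s : Int)
    (d : PySem.Dict String Int) (n : String) (v : Int)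
    (h : (pvBuild unrep (PySem.List.enumerate xs s) d).get? n = some v) :
    d.get? n = some v ∨ s ≤ v := by
  induction xs generalizing s d with
  | nil => exact Or.inl h
  | cons x rest ih =>
    rw [PySem.List.enumerate_cons] at h
    simp only [pvBuild, List.foldl_cons] at h
    rcases ih (s + 1) _ h with h' | h'
    · split_ifs at h' with hc
      · by_cases he : n = x.1
        · subst he
          rw [PySem.Dict.get?_insert_self] at h'
          injection h' with h2
          exact Or.inr (by omega)
        · rw [PySem.Dict.get?_insert_of_ne _ _ he] at h'
          exact Or.inl h'
      · exact Or.inl h'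
    · exact Or.inr (by omega)

-- Main invariant lemma: the filter against the fully-built table equals A's loop,
-- provided seen matches d's key set and all tabled values are below the start index.
theorem pvGoA_cons (unrep : List String) (x : String × String)
    (rest : List (String × String)) (seen : PySem.Set String) :
    pvGoA unrep (x :: rest) seen =
      (if ¬ (unrep.contains x.1) then x :: pvGoA unrep rest seen
       else if ¬ (PySem.Set.contains seen x.1) then
         x :: pvGoA unrep rest (PySem.Set.add seen x.1)
       else pvGoA unrep rest seen) := rfl

theorem pvMain (unrep : List String) (xs : List (String × String)) (s : Int)
    (d : PySem.Dict String Int) (seen : PySem.Set String)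
    (hseen : ∀ n, PySem.Set.contains seen n = d.contains n)
    (hlt : ∀ n v, d.get? n = some v → v < s) :
    (PySem.List.enumerate xs s).filterMap
      (fun p =>
        if ¬ (unrep.contains p.2.1) ∨
            (pvBuild unrep (PySem.List.enumerate xs s) d).get? p.2.1 = some p.1 then
          some p.2
        else none)
      = pvGoA unrep xs seen := by
  induction xs generalizing s d seen with
  | nil => simp [PySem.List.enumerate_nil, pvGoA]
  | cons x rest ih =>
    rw [PySem.List.enumerate_cons]
    set d' : PySem.Dict String Int :=
      if unrep.contains x.1 ∧ ¬ d.contains x.1 then d.insert x.1 s else d with hd'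
    have hstep : pvBuild unrep ((s, x) :: PySem.List.enumerate rest (s + 1)) d
        = pvBuild unrep (PySem.List.enumerate rest (s + 1)) d' := by
      rw [hd']; rfl
    have hlt' : ∀ n v, d'.get? n = some v → v < s + 1 := by
      intro n v hv
      rw [hd'] at hv
      split_ifs at hv with hc
      · by_cases he : n = x.1
        · subst he; rw [PySem.Dict.get?_insert_self] at hv
          injection hv with hv2; omega
        · rw [PySem.Dict.get?_insert_of_ne _ _ he] at hv
          have := hlt n v hv; omega
      · have := hlt n v hv; omega
    have hhead : (pvBuild unrep (PySem.List.enumerate rest (s + 1)) d').get? x.1 = some s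
        ↔ (unrep.contains x.1 = true ∧ d.contains x.1 = false) := by
      constructor
      · intro h
        rcases pvBuild_bound unrep rest (s + 1) d' x.1 s h with h' | h'
        · rw [hd'] at h'
          split_ifs at h' with hc
          · exact ⟨hc.1, by simpa using hc.2⟩
          · exact absurd (hlt _ _ h') (by omega)
        · omega
      · intro hb
        apply pvBuild_preserve
        rw [hd', if_pos ⟨hb.1, by simp [hb.2]⟩, PySem.Dict.get?_insert_self]
    simp only [List.filterMap_cons, hstep, pvGoA_cons]
    by_cases hu : unrep.contains x.1
    · by_cases hseenx : PySem.Set.contains seen x.1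
      · -- already seen: dropped by both
        have hdc : d.contains x.1 = true := by rw [← hseen]; exact hseenx
        have hd'd : d' = d := by rw [hd']; simp [hdc]
        have hcond : ¬ (¬ (unrep.contains x.1 = true) ∨
            (pvBuild unrep (PySem.List.enumerate rest (s + 1)) d').get? x.1 = some s) := by
          rintro (h | h)
          · exact h hu
          · exact absurd (hhead.1 h).2 (by simp [hdc])
        rw [if_neg hcond, if_neg (by simp only [not_not]; exact hu), if_neg (by simp only [not_not]; exact hseenx), hd'd]
        exact ih (s + 1) d seen hseen (by intro n v hv; have := hlt n v hv; omega)
      · -- first occurrence: kept by both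
        have hdc : d.contains x.1 = false := by rw [← hseen]; simpa using hseenx
        rw [if_pos (Or.inr (hhead.2 ⟨hu, hdc⟩)),
          if_neg (by simp only [not_not]; exact hu), if_pos hseenx]
        have hbridge : ∀ n, PySem.Set.contains (PySem.Set.add seen x.1) n = d'.contains n := by
          intro n
          rw [hd', if_pos ⟨hu, by simp [hdc]⟩, PySem.Dict.contains_insert]
          by_cases he : n = x.1
          · subst he
            simp [PySem.Set.contains, PySem.Set.mem_add]
          · have hadd : (PySem.Set.contains (PySem.Set.add seen x.1) n)
                = PySem.Set.contains seen n := by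
              simp [PySem.Set.contains, PySem.Set.mem_add, he]
            rw [hadd, hseen]
            simp [he]
        exact congrArg (List.cons x) (ih (s + 1) d' (PySem.Set.add seen x.1) hbridge hlt')
    · -- name not unrepeated: kept unconditionally by both
      have hd'd : d' = d := by rw [hd', if_neg (by intro hc; exact hu hc.1)]
      rw [if_pos (Or.inl hu), if_pos hu, hd'd]
      exact congrArg (List.cons x)
        (ih (s + 1) d seen hseen (by intro n v hv; have := hlt n v hv; omega))

-- ===== VERDICT (by name: the statement is the Claim_ definition above) =====
theorem remove_redundant_unrepeated_entities_spec : Claim_equal_remove_redundant_unrepeated_entities := by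
  intro xs unrep _
  unfold Spec_remove_redundant_unrepeated_entities
  unfold remove_redundant_unrepeated_entities remove_redundant_unrepeated_entities_alt
  rw [pvFoldA, List.nil_append]
  exact (pvMain unrep xs 0 PySem.Dict.empty PySem.Set.empty
    (by intro n; simp [PySem.Set.contains, PySem.Set.empty, PySem.Dict.contains_empty])
    (by intro n v h; simp [PySem.Dict.get?_empty] at h)).symm
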